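-- pv_equiv track=rewrite | github.com/dramppet/Python | Python_advanced/7_Modules/lab/P03_triangle.py | triangle_figure
-- ===== SOURCE A (Python) =====
-- def triangle_figure(num):
--     figure = ''
--
--     for n in range(1, num + 1):
--         for i in range(1, n + 1):
--             figure += f'{i} '
--         figure +='\n'
--
--     for n in range(num, 0, -1):
--         for i in  range(1, n):
--             figure += f'{i} '
--         figure += '\n'
--
--     return figure
-- ===== SOURCE B (Python) =====
-- def triangle_figure(num):
--     rows = ['']
--     prefix = ''
--     for n in range(1, num + 1):
--         prefix += f'{n} '
--         rows.append(prefix)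
--     parts = []
--     for w in range(1, num + 1):
--         parts.append(rows[w] + '\n')
--     for n in range(num, 0, -1):
--         parts.append(rows[n - 1] + '\n')
--     return ''.join(parts)
-- ===== Notes on version B (the rewrite author's own statement) =====
-- stated objective: faster
-- what changed: B maintains each row as an incrementally extended prefix string stored once in a list, then emits both halves by O(1) lookups and a single join, instead of A's nested loops that rebuild every row character by character with repeated string concatenation.
import Mathlib
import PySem

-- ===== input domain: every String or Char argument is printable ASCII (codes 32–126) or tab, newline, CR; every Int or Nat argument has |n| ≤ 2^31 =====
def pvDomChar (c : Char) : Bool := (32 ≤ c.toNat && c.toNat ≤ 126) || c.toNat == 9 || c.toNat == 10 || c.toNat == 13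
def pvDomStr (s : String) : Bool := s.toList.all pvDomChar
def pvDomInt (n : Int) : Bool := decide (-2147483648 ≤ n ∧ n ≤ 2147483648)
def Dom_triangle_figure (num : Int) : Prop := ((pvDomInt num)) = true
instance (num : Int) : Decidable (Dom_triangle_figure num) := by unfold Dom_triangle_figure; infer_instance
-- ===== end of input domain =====

-- B replaces A's nested row-rebuilding loops by one incremental prefix pass plus lookups and a join (fewer concatenations).

-- ===== PORT A =====
def triangle_figure (num : Int) : String :=
  let figure : String := ""
  let figure := (PySem.List.pyRange 1 (num + 1) 1).foldl
    (fun figure n =>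
      ((PySem.List.pyRange 1 (n + 1) 1).foldl
        (fun figure i => figure ++ (PySem.Int.toStr i ++ " ")) figure) ++ "\n")
    figure
  let figure := (PySem.List.pyRange num 0 (-1)).foldl
    (fun figure n =>
      ((PySem.List.pyRange 1 n 1).foldl
        (fun figure i => figure ++ (PySem.Int.toStr i ++ " ")) figure) ++ "\n")
    figure
  figure

-- ===== PORT B =====
def triangle_figure_alt (num : Int) : String :=
  let st := (PySem.List.pyRange 1 (num + 1) 1).foldl
    (fun (p : String × List String) n =>
      let pre := p.1 ++ (PySem.Int.toStr n ++ " ")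
      (pre, p.2 ++ [pre]))
    ("", [""])
  let rows := st.2
  let parts := (PySem.List.pyRange 1 (num + 1) 1).foldl
    (fun parts w => parts ++ [PySem.List.pyGetD rows w "" ++ "\n"]) []
  let parts := (PySem.List.pyRange num 0 (-1)).foldl
    (fun parts n => parts ++ [PySem.List.pyGetD rows (n - 1) "" ++ "\n"]) parts
  String.join parts

-- ===== PRECONDITION & SPEC =====
def Spec_triangle_figure (num : Int) (out : String) : Prop := out = triangle_figure_alt num
instance (num : Int) (out : String) : Decidable (Spec_triangle_figure num out) := by unfold Spec_triangle_figure; infer_instance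

-- ===== CLAIM (what is proved, stated in full; the proofs are below) =====
def Claim_equal_triangle_figure : Prop := ∀ (num : Int), Dom_triangle_figure num → Spec_triangle_figure num (triangle_figure num)

-- ===== LEMMAS AND PROOFS =====

/-- the piece appended for one number: `f'{i} '` -/
def gpiece (i : Int) : String := PySem.Int.toStr i ++ " "

/-- the row `'1 2 … (b-1) '` (numbers strictly below `b`) -/
def rowTo (b : Int) : String := String.join ((PySem.List.pyRange 1 b 1).map gpiece)

theorem sjoin_aux (l : List String) (a : String) :
    l.foldl (· ++ ·) a = a ++ String.join l := by
  induction l generalizing a with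
  | nil => simp [String.join]
  | cons b t ih =>
    rw [List.foldl_cons, ih (a ++ b)]
    show _ = a ++ List.foldl (· ++ ·) "" (b :: t)
    rw [List.foldl_cons, ih ("" ++ b)]
    simp [String.append_assoc]

theorem sjoin_cons (s : String) (l : List String) :
    String.join (s :: l) = s ++ String.join l := by
  show List.foldl (· ++ ·) "" (s :: l) = _
  rw [List.foldl_cons]
  simpa using sjoin_aux l ("" ++ s)

theorem sjoin_append (l₁ l₂ : List String) :
    String.join (l₁ ++ l₂) = String.join l₁ ++ String.join l₂ := by
  show List.foldl (· ++ ·) "" (l₁ ++ l₂) = _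
  rw [List.foldl_append]
  exact sjoin_aux l₂ _

/-- a string-accumulating fold is the initial string followed by a join -/
theorem fold_str {α : Type} (l : List α) (f : String → α → String) (h : α → String)
    (hf : ∀ s x, f s x = s ++ h x) (init : String) :
    l.foldl f init = init ++ String.join (l.map h) := by
  induction l generalizing init with
  | nil => simp [String.join]
  | cons a t ih =>
    rw [List.foldl_cons, hf, ih, List.map_cons, sjoin_cons, String.append_assoc]

theorem rowTo_succ (a : Int) (ha : 1 ≤ a) :
    rowTo (a + 1) = rowTo a ++ gpiece a := by
  unfold rowTo
  rw [PySem.List.pyRange_one_succ_right ha, List.map_append, sjoin_append]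
  simp [String.join]

/-- invariant of B's building loop -/
theorem build_inv (k : Nat) : ∀ (a : Int), 1 ≤ a → ∀ (rs : List String),
    (PySem.List.pyRange a (a + k) 1).foldl
      (fun (p : String × List String) n =>
        let pre := p.1 ++ (PySem.Int.toStr n ++ " ")
        (pre, p.2 ++ [pre])) (rowTo a, rs)
    = (rowTo (a + k), rs ++ (PySem.List.pyRange (a + 1) (a + k + 1) 1).map rowTo) := by
  induction k with
  | zero =>
    intro a ha rs
    rw [PySem.List.pyRange_one_eq_nil (by omega), PySem.List.pyRange_one_eq_nil (by omega)]
    simp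
  | succ k ih =>
    intro a ha rs
    rw [PySem.List.pyRange_one_cons (by push_cast; omega), List.foldl_cons]
    have hrow : rowTo a ++ (PySem.Int.toStr a ++ " ") = rowTo (a + 1) := by
      rw [rowTo_succ a ha]; rfl
    simp only [hrow]
    have h1 : a + (k + 1 : Nat) = (a + 1) + k := by push_cast; omega
    rw [h1, ih (a + 1) (by omega) (rs ++ [rowTo (a + 1)])]
    rw [PySem.List.pyRange_one_cons (show (a:Int) + 1 < a + 1 + (k:Nat) + 1 by omega),
       List.map_cons, List.append_assoc, List.singleton_append]

theorem rows_get (num w : Int) (h0 : 0 ≤ w) (h1 : w ≤ num) :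
    PySem.List.pyGetD ((PySem.List.pyRange 1 (num + 2) 1).map rowTo) w "" = rowTo (1 + w) := by
  have hw : w = ((w.toNat : Nat) : Int) := by omega
  rw [hw]
  rw [PySem.List.pyGetD_map_pyRange_one rowTo 1 (num + 2) w.toNat "" (by omega)]

-- ===== VERDICT (by name: the statement is the Claim_ definition above) =====
theorem triangle_figure_spec : Claim_equal_triangle_figure := by
  intro num _
  show triangle_figure num = triangle_figure_alt num
  simp only [triangle_figure, triangle_figure_alt]
  -- characterize A: two joins
  have hinner : ∀ (b : Int) (s : String),
      (PySem.List.pyRange 1 b 1).foldl (fun figure i => figure ++ (PySem.Int.toStr i ++ " ")) s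
        = s ++ rowTo b := by
    intro b s
    exact fold_str _ _ gpiece (fun _ _ => rfl) s
  have hA1 : (PySem.List.pyRange 1 (num + 1) 1).foldl
      (fun figure n =>
        ((PySem.List.pyRange 1 (n + 1) 1).foldl
          (fun figure i => figure ++ (PySem.Int.toStr i ++ " ")) figure) ++ "\n") ""
      = "" ++ String.join ((PySem.List.pyRange 1 (num + 1) 1).map (fun n => rowTo (n + 1) ++ "\n")) := by
    refine fold_str _ _ _ (fun s n => ?_) ""
    rw [hinner, String.append_assoc]
  have hA2 : ∀ (init : String), (PySem.List.pyRange num 0 (-1)).foldl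
      (fun figure n =>
        ((PySem.List.pyRange 1 n 1).foldl
          (fun figure i => figure ++ (PySem.Int.toStr i ++ " ")) figure) ++ "\n") init
      = init ++ String.join ((PySem.List.pyRange num 0 (-1)).map (fun n => rowTo n ++ "\n")) := by
    intro init
    refine fold_str _ _ _ (fun s n => ?_) init
    rw [hinner, String.append_assoc]
  rw [hA1, hA2]
  -- characterize B
  rcases Int.lt_or_le num 0 with hneg | hneg
  · rw [PySem.List.pyRange_one_eq_nil (by omega), PySem.List.pyRange_neg_one_eq_nil (by omega)]
    simp [String.join]
  · have hk : num + 1 = 1 + (num.toNat : Int) := by omega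
    have hrows : ((PySem.List.pyRange 1 (num + 1) 1).foldl
        (fun (p : String × List String) n =>
          let pre := p.1 ++ (PySem.Int.toStr n ++ " ")
          (pre, p.2 ++ [pre])) ("", [""])).2
        = (PySem.List.pyRange 1 (num + 2) 1).map rowTo := by
      have h0 : ("" : String) = rowTo 1 := by
        unfold rowTo
        rw [PySem.List.pyRange_one_eq_nil (by omega)]
        rfl
      have hb : num + 2 = 1 + (num.toNat : Int) + 1 := by omega
      rw [hk, hb, h0, build_inv num.toNat 1 (by omega) [rowTo 1]]
      rw [PySem.List.pyRange_one_cons (show (1:Int) < 1 + (num.toNat : Int) + 1 by omega)]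
      rw [List.map_cons, List.singleton_append]
    rw [hrows]
    rw [PySem.List.foldl_append_singleton_eq_map, PySem.List.foldl_append_singleton_eq_map]
    rw [List.nil_append, sjoin_append]
    have e0 : ∀ s : String, "" ++ s = s := fun s => by simp
    rw [e0]
    congr 1
    · congr 1
      apply List.map_congr_left
      intro w hw
      rw [PySem.List.mem_pyRange_one] at hw
      rw [rows_get num w (by omega) (by omega)]
      rw [show (1 : Int) + w = w + 1 by omega]
    · congr 1
      apply List.map_congr_left
      intro n hn
      rw [PySem.List.mem_pyRange_neg_one] at hn
      rw [rows_get num (n - 1) (by omega) (by omega)]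
      rw [show (1 : Int) + (n - 1) = n by omega]
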